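-- pv_equiv track=rewrite | github.com/foreverxujiahuan/algorithm | 竞赛/A352/A.py | f
-- ===== SOURCE A (Python) =====
-- def f(sub, threshold):
--     l = 0
--     r = len(sub)
--     length = len(sub)
--     if not sub[l] % 2 == 0:
--         return False
--     for i in range(l, r):
--         if i != length - 1 and not sub[i] % 2 != sub[i + 1] % 2:
--             return False
--     for i in range(l, r):
--         if sub[i] > threshold:
--             return False
--     return True
-- ===== SOURCE B (Python) =====
-- def f(sub, threshold):
--     return all(x % 2 == i % 2 and x <= threshold for i, x in enumerate(sub))
-- ===== Notes on version B (the rewrite author's own statement) =====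
-- stated objective: simpler
-- what changed: Replaces A's three separate checks (first element even, pairwise neighbour parity alternation, then a second full pass for the threshold) with one enumerate pass testing the absolute per-index condition sub[i] % 2 == i % 2 together with sub[i] <= threshold.
-- crash fix: On the empty list A raises IndexError at sub[0]; B returns True (the vacuous truth of the all()). — e.g. on f([], 0): A raises IndexError, B returns true
import Mathlib
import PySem

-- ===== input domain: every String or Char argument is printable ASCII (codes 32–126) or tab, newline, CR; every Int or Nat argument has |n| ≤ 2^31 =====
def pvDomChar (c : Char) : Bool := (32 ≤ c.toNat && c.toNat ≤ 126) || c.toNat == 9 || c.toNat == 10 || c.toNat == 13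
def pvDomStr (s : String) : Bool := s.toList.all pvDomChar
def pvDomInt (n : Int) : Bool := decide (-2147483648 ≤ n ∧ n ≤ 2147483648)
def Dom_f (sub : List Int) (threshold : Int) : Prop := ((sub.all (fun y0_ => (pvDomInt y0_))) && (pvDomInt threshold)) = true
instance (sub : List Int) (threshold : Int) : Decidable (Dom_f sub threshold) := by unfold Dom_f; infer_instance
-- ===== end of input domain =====

-- B replaces A's three checks (first element even, neighbour parity alternation, second
-- threshold pass) with one enumerate pass testing sub[i] % 2 == i % 2 and sub[i] <= threshold.

-- ===== PORT A =====
-- Each early-return for-loop over range(l, r) is ported as '.any' of its exit condition;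
-- sub[i] / sub[i+1] inside the loops are always in range, so pyGetD is exact there.
def f (sub : List Int) (threshold : Int) : Bool :=
  let l : Int := 0
  let r : Int := (sub.length : Int)
  let length : Int := (sub.length : Int)
  if ¬ (PySem.Int.mod (PySem.List.pyGetD sub l 0) 2 = 0) then false
  else if (PySem.List.pyRange l r 1).any (fun i =>
      decide (i ≠ length - 1) &&
      ! decide (PySem.Int.mod (PySem.List.pyGetD sub i 0) 2 ≠ PySem.Int.mod (PySem.List.pyGetD sub (i + 1) 0) 2))
    then false
  else if (PySem.List.pyRange l r 1).any (fun i => decide (PySem.List.pyGetD sub i 0 > threshold)) then false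
  else true

-- ===== PORT B =====
def f_alt (sub : List Int) (threshold : Int) : Bool :=
  (PySem.List.enumerate sub 0).all (fun p =>
    decide (PySem.Int.mod p.2 2 = PySem.Int.mod p.1 2) && decide (p.2 ≤ threshold))

-- ===== PRECONDITION & SPEC =====
-- Pre_ excludes only the empty list, on which A raises IndexError at sub[0].
def Pre_f (sub : List Int) (threshold : Int) : Prop := sub ≠ []
instance (sub : List Int) (threshold : Int) : Decidable (Pre_f sub threshold) := by unfold Pre_f; infer_instance
def pvWitness_f : List Int × Int := ([2, 1, 4], 5)

-- On the empty list A raises IndexError at sub[0]; B returns True (the vacuous all()).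
def Raises_f (sub : List Int) (threshold : Int) : Prop := sub = []
instance (sub : List Int) (threshold : Int) : Decidable (Raises_f sub threshold) := by unfold Raises_f; infer_instance
def pvRaiseWitness_f : List Int × Int := ([], 0)
def pvRaiseWitnessOut_f : Bool := true

def Spec_f (sub : List Int) (threshold : Int) (out : Bool) : Prop := out = f_alt sub threshold
instance (sub : List Int) (threshold : Int) (out : Bool) : Decidable (Spec_f sub threshold out) := by unfold Spec_f; infer_instance

-- ===== CLAIM (what is proved, stated in full; the proofs are below) =====
def Claim_equal_f : Prop := ∀ (sub : List Int) (threshold : Int), Dom_f sub threshold → Pre_f sub threshold → Spec_f sub threshold (f sub threshold)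
def Claim_raises_f : Prop := (∀ (sub : List Int) (threshold : Int), Dom_f sub threshold → Raises_f sub threshold → ¬ Pre_f sub threshold) ∧ (Dom_f (pvRaiseWitness_f.1) (pvRaiseWitness_f.2) ∧ Raises_f (pvRaiseWitness_f.1) (pvRaiseWitness_f.2) ∧ f_alt (pvRaiseWitness_f.1) (pvRaiseWitness_f.2) = pvRaiseWitnessOut_f)

-- ===== LEMMAS AND PROOFS =====

lemma pyGetD_nat (sub : List Int) (k : Nat) :
    PySem.List.pyGetD sub (k : Int) 0 = sub[k]?.getD (0 : Int) := by
  simp [List.getD]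

-- the parity invariant: even start + alternating neighbours ↔ parity matches the index
lemma parity_iff (sub : List Int) (hne : sub ≠ []) :
    ((2 : Int) ∣ sub[0]?.getD (0 : Int) ∧ ∀ k : Nat, k + 1 < sub.length →
        ¬ sub[k]?.getD (0 : Int) % 2 = sub[(k+1)]?.getD (0 : Int) % 2)
    ↔ ∀ k : Nat, k < sub.length → sub[k]?.getD (0 : Int) % 2 = (k : Int) % 2 := by
  constructor
  · rintro ⟨he, halt⟩ k
    induction k with
    | zero => intro _; omega
    | succ k ih =>
      intro hk
      have h1 := ih (by omega)
      have h2 := halt k hk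
      push_cast
      push_cast at h1
      omega
  · intro h
    have hlen : 0 < sub.length := List.length_pos_iff.mpr hne
    constructor
    · have := h 0 hlen; omega
    · intro k hk
      have h1 := h k (by omega)
      have h2 := h (k+1) hk
      push_cast at h1 h2
      omega

-- A returns True iff: first element even, neighbour parities differ, all elements ≤ threshold
lemma hA_char (sub : List Int) (threshold : Int) :
    f sub threshold = true ↔
      ((2 : Int) ∣ sub[0]?.getD (0 : Int) ∧
       (∀ k : Nat, k + 1 < sub.length → ¬ sub[k]?.getD (0 : Int) % 2 = sub[(k+1)]?.getD (0 : Int) % 2) ∧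
       (∀ k : Nat, k < sub.length → sub[k]?.getD (0 : Int) ≤ threshold)) := by
  simp only [f]
  simp [List.any_eq_true, List.any_eq_false, PySem.List.mem_pyRange_one]
  constructor
  · rintro ⟨he, halt, hth⟩
    refine ⟨by simpa [PySem.List.pyGetD_zero, List.getD] using he, fun k hk => ?_, fun k hk => ?_⟩
    · have this := halt (k : Int) (by omega) (by omega) (by omega)
      have e : (k : Int) + 1 = ((k+1 : Nat) : Int) := by push_cast; ring
      simp only [e, pyGetD_nat] at this
      exact this
    · have := hth (k : Int) (by omega) (by omega)
      simp only [pyGetD_nat] at this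
      exact this
  · rintro ⟨he, halt, hth⟩
    refine ⟨by simpa [PySem.List.pyGetD_zero, List.getD] using he, fun x hx0 hxlt hxne => ?_, fun x hx0 hxlt => ?_⟩
    · lift x to ℕ using hx0
      have this := halt x (by omega)
      have e : (x : Int) + 1 = ((x+1 : Nat) : Int) := by push_cast; ring
      simp only [e, pyGetD_nat]
      exact this
    · lift x to ℕ using hx0
      have := hth x (by omega)
      simp only [pyGetD_nat]
      exact this

-- B returns True iff every element's parity matches its index and it is ≤ threshold
lemma hB_char (sub : List Int) (threshold : Int) :
    f_alt sub threshold = true ↔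
      ∀ k : Nat, k < sub.length → sub[k]?.getD (0 : Int) % 2 = (k : Int) % 2 ∧ sub[k]?.getD (0 : Int) ≤ threshold := by
  simp [f_alt, List.all_eq_true, PySem.List.mem_enumerate_iff]
  constructor
  · intro h k hk
    have := h (k : Int) (sub[k]) k hk rfl rfl
    simpa [List.getElem?_eq_getElem hk] using this
  · rintro h a b k hk rfl rfl
    have := h k hk
    simpa [List.getElem?_eq_getElem hk] using this

theorem f_main (sub : List Int) (threshold : Int) (hne : sub ≠ []) :
    f sub threshold = f_alt sub threshold := by
  have hA := hA_char sub threshold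
  have hB := hB_char sub threshold
  have hP := parity_iff sub hne
  cases ha : f sub threshold <;> cases hb : f_alt sub threshold
  · rfl
  · rw [ha] at hA; rw [hb] at hB
    have h1 := hB.mp rfl
    simp only [Bool.false_eq_true, false_iff] at hA
    exact absurd ⟨(hP.mpr (fun k hk => (h1 k hk).1)).1,
      (hP.mpr (fun k hk => (h1 k hk).1)).2, fun k hk => (h1 k hk).2⟩ hA
  · rw [ha] at hA; rw [hb] at hB
    obtain ⟨he, halt, hth⟩ := hA.mp rfl
    simp only [Bool.false_eq_true, false_iff] at hB
    exact absurd (fun k hk => ⟨(hP.mp ⟨he, halt⟩) k hk, hth k hk⟩) hB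
  · rfl

-- ===== VERDICT (by name: the statement is the Claim_ definition above) =====
theorem f_spec : Claim_equal_f := by
  intro sub threshold _ hpre
  unfold Spec_f
  exact f_main sub threshold hpre

@[simp] theorem f_raises : Claim_raises_f := by
  unfold Claim_raises_f
  exact ⟨fun sub t _ hr hp => hp hr, by decide⟩
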